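-- pv_equiv track=rewrite | github.com/OP-DSL/OPS | ops_translator_legacy/c/util.py | group_n_per_line
-- ===== SOURCE A (Python) =====
-- def group_n_per_line(vals, n_per_line=4, sep=",", group_sep="\n", spec_group_sep=None):
--     if spec_group_sep:
--         group_sep = spec_group_sep
--     else:
--         group_sep = sep + group_sep
--     return (group_sep).join(
--         [
--             sep.join([vals[i] for i in range(s, min(len(vals), s + n_per_line))])
--             for s in range(0, len(vals), n_per_line)
--         ]
--     )
-- ===== SOURCE B (Python) =====
-- def group_n_per_line(vals, n_per_line=4, sep=",", group_sep="\n", spec_group_sep=None):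
--     if spec_group_sep:
--         group_sep = spec_group_sep
--     else:
--         group_sep = sep + group_sep
--     lines = []
--     current = []
--     for v in vals:
--         current.append(v)
--         if len(current) == n_per_line:
--             lines.append(sep.join(current))
--             current = []
--     if current:
--         lines.append(sep.join(current))
--     return group_sep.join(lines)
-- ===== Notes on version B (the rewrite author's own statement) =====
-- stated objective: idiomatic
-- what changed: Replaces the two offset-indexed range comprehensions (start offsets 0,n,2n,... with an inner index scan per chunk) by a single pass over the values with a flush buffer that emits a joined line every n_per_line elements.
-- outside the precondition, e.g. on group_n_per_line(['a'], 0, ',', '\n', None): A raises ValueError, B returns 'a'; on group_n_per_line(['a', 'b'], -1, ',', '\n', None): A returns '', B returns 'a,b'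
import Mathlib
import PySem

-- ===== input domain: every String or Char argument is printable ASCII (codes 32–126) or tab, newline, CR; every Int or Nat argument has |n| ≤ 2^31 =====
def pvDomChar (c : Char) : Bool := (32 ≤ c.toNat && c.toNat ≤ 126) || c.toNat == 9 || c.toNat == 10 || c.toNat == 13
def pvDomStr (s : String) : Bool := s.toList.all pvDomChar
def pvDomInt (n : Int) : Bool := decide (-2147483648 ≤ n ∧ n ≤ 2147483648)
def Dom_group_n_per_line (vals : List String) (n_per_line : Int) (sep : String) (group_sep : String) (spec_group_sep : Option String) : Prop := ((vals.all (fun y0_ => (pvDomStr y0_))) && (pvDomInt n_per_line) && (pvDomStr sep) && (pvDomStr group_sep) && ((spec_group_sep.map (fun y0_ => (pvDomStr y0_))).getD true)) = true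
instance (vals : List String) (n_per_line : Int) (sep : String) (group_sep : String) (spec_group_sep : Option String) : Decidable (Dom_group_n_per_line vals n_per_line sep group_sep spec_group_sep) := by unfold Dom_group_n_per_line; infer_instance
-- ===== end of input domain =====

-- B replaces A's offset-indexed range comprehensions with one pass over vals and a flush
-- buffer (idiomatic, same cost). Equivalence is claimed for n_per_line ≥ 1 (see Pre_).

-- ===== PORT A =====
-- literal port of A: indices produced by the ranges are always in bounds, so pyGetD's
-- default "" is never consulted.
def group_n_per_line (vals : List String) (n_per_line : Int) (sep : String) (group_sep : String) (spec_group_sep : Option String) : String :=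
  -- Python truthiness: `if spec_group_sep:` — None and "" are both falsy
  let gsep : String :=
    match spec_group_sep with
    | some s => if s = "" then sep ++ group_sep else s
    | none => sep ++ group_sep
  PySem.Str.join gsep
    ((PySem.List.pyRange 0 (vals.length : Int) n_per_line).map (fun s =>
      PySem.Str.join sep
        ((PySem.List.pyRange s (min (vals.length : Int) (s + n_per_line)) 1).map
          (fun i => PySem.List.pyGetD vals i ""))))

-- ===== PORT B =====
-- B's loop: state (lines, current); flush current into lines each time it reaches n_per_line.
def pvAltFlush (sep : String) (n : Int) : List String → List String → List String → List String
  | lines, current, [] => if current = [] then lines else lines ++ [PySem.Str.join sep current]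
  | lines, current, v :: rest =>
    let current' := current ++ [v]
    if (current'.length : Int) = n then
      pvAltFlush sep n (lines ++ [PySem.Str.join sep current']) [] rest
    else
      pvAltFlush sep n lines current' rest

def group_n_per_line_alt (vals : List String) (n_per_line : Int) (sep : String) (group_sep : String) (spec_group_sep : Option String) : String :=
  let gsep : String :=
    match spec_group_sep with
    | some s => if s = "" then sep ++ group_sep else s
    | none => sep ++ group_sep
  PySem.Str.join gsep (pvAltFlush sep n_per_line [] [] vals)

-- ===== PRECONDITION & SPEC =====
-- Pre_ excludes n_per_line ≤ 0, outside the natural domain of a per-line count: at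
-- n_per_line = 0 A raises ValueError (range step 0), and for negative counts A's empty
-- descending range silently discards every value (returns ""), while B emits them in one line.
def Pre_group_n_per_line (vals : List String) (n_per_line : Int) (sep : String) (group_sep : String) (spec_group_sep : Option String) : Prop := 1 ≤ n_per_line
instance (vals : List String) (n_per_line : Int) (sep : String) (group_sep : String) (spec_group_sep : Option String) : Decidable (Pre_group_n_per_line vals n_per_line sep group_sep spec_group_sep) := by unfold Pre_group_n_per_line; infer_instance

def pvWitness_group_n_per_line : List String × Int × String × String × Option String := (["a", "b", "c"], 2, ",", "\n", none)

def Spec_group_n_per_line (vals : List String) (n_per_line : Int) (sep : String) (group_sep : String) (spec_group_sep : Option String) (out : String) : Prop := out = group_n_per_line_alt vals n_per_line sep group_sep spec_group_sep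
instance (vals : List String) (n_per_line : Int) (sep : String) (group_sep : String) (spec_group_sep : Option String) (out : String) : Decidable (Spec_group_n_per_line vals n_per_line sep group_sep spec_group_sep out) := by unfold Spec_group_n_per_line; infer_instance

-- ===== CLAIM (what is proved, stated in full; the proofs are below) =====
def Claim_equal_group_n_per_line : Prop := ∀ (vals : List String) (n_per_line : Int) (sep : String) (group_sep : String) (spec_group_sep : Option String), Dom_group_n_per_line vals n_per_line sep group_sep spec_group_sep → Pre_group_n_per_line vals n_per_line sep group_sep spec_group_sep → Spec_group_n_per_line vals n_per_line sep group_sep spec_group_sep (group_n_per_line vals n_per_line sep group_sep spec_group_sep)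

-- ===== LEMMAS AND PROOFS =====

-- canonical chunking: successive blocks of n elements (n ≥ 1 is the case we use)
def pvChunks (n : Nat) : List String → List (List String)
  | [] => []
  | x :: xs => (x :: xs.take (n - 1)) :: pvChunks n (xs.drop (n - 1))
termination_by l => l.length
decreasing_by simp

theorem pvChunks_step (n : Nat) (hn : 1 ≤ n) (l : List String) (hl : l ≠ []) :
    pvChunks n l = l.take n :: pvChunks n (l.drop n) := by
  cases l with
  | nil => exact absurd rfl hl
  | cons x xs =>
    rw [pvChunks.eq_def]
    have h1 : n = (n - 1) + 1 := by omega
    refine List.cons_eq_cons.2 ⟨?_, ?_⟩ <;> rw [h1] <;> simp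

theorem pvChunks_nil (n : Nat) : pvChunks n [] = [] := by
  rw [pvChunks.eq_def]

-- pyRange with positive step, positive length: peel off the first offset
theorem pvPyRange_pos_cons (n L : Int) (hn : 0 < n) (hL : 0 < L) :
    PySem.List.pyRange 0 L n = 0 :: (PySem.List.pyRange 0 (L - n) n).map (· + n) := by
  rw [PySem.List.pyRange_of_pos _ _ hn, PySem.List.pyRange_of_pos _ _ hn]
  simp only [sub_zero]
  have h1 : L + n - 1 = (L - n + n - 1) + 1 * n := by ring
  have hdiv : (L + n - 1) / n = (L - n + n - 1) / n + 1 := by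
    rw [h1, Int.add_mul_ediv_right _ _ (by omega : n ≠ 0)]
  by_cases hLn : 0 < L - n
  · rw [if_pos hL, if_pos hLn, hdiv]
    have h2 : 0 ≤ (L - n + n - 1) / n := Int.ediv_nonneg (by omega) (by omega)
    have h3 : ((L - n + n - 1) / n + 1).toNat = ((L - n + n - 1) / n).toNat + 1 := by omega
    rw [h3, List.range_succ_eq_map]
    refine List.cons_eq_cons.2 ⟨by simp, ?_⟩
    rw [List.map_map, List.map_map]
    apply List.map_congr_left
    intro k _
    simp only [Function.comp_apply]
    push_cast
    ring
  · rw [if_pos hL, if_neg hLn]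
    have hz : (L - n + n - 1) / n = 0 := Int.ediv_eq_zero_of_lt (by omega) (by omega)
    rw [hdiv, hz]
    simp

theorem pvPyRange_pos_nil (n L : Int) (hn : 0 < n) (hL : L ≤ 0) :
    PySem.List.pyRange 0 L n = [] := by
  rw [PySem.List.pyRange_of_pos _ _ hn, if_neg (by omega)]
  simp

-- A's inner comprehension is take-of-drop
theorem pvInner_eq (vals : List String) (n s : Int) (hs : 0 ≤ s) (hn : 0 < n) :
    (PySem.List.pyRange s (min (vals.length : Int) (s + n)) 1).map
      (fun i => PySem.List.pyGetD vals i "")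
    = (vals.drop s.toNat).take n.toNat := by
  rw [PySem.List.pyRange_one, List.map_map]
  apply List.ext_getElem
  · simp
    omega
  · intro k h1 h2
    have hk : k < (min (vals.length : Int) (s + n) - s).toNat := by simpa using h1
    simp only [List.getElem_map, List.getElem_range, Function.comp_apply]
    rw [PySem.List.pyGetD_eq_getElem vals "" (by omega) (by omega)]
    rw [List.getElem_take, List.getElem_drop]
    have hidx : (s + (k : Int)).toNat = s.toNat + k := by omega
    simp [hidx]

-- A's outer comprehension produces exactly the chunks
theorem pvOuter_eq (n : Int) (hn : 1 ≤ n) (l : List String) :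
    (PySem.List.pyRange 0 (l.length : Int) n).map
      (fun s => (l.drop s.toNat).take n.toNat) = pvChunks n.toNat l := by
  obtain ⟨L, hL⟩ : ∃ L, l.length = L := ⟨_, rfl⟩
  induction L using Nat.strong_induction_on generalizing l with
  | _ L IH =>
  cases l with
  | nil =>
    rw [pvPyRange_pos_nil n _ (by omega) (by simp), pvChunks_nil]
    simp
  | cons x xs =>
    have hxl : xs.length + 1 = L := by simpa using hL
    rw [pvPyRange_pos_cons n _ (by omega) (by simp)]
    rw [pvChunks_step n.toNat (by omega) _ (by simp)]
    simp only [List.map_cons, List.map_map]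
    refine List.cons_eq_cons.2 ⟨by simp, ?_⟩
    have hdroplen : ((x :: xs).drop n.toNat).length < L := by
      simp only [List.length_drop, List.length_cons]
      omega
    have hIH := IH _ hdroplen ((x :: xs).drop n.toNat) rfl
    have hrange : PySem.List.pyRange 0 (((x :: xs).length : Int) - n) n
        = PySem.List.pyRange 0 ((((x :: xs).drop n.toNat).length : Int)) n := by
      by_cases hc : n < ((x :: xs).length : Int)
      · congr 1
        simp only [List.length_drop, List.length_cons]
        omega
      · rw [pvPyRange_pos_nil n _ (by omega) (by omega),
            pvPyRange_pos_nil n _ (by omega)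
              (by simp only [List.length_drop, List.length_cons]; omega)]
    rw [hrange, ← hIH]
    apply List.map_congr_left
    intro s hs
    have h0s : 0 ≤ s := ((PySem.List.mem_pyRange_iff_of_pos (by omega) s).1 hs).1
    simp only [Function.comp_apply]
    rw [List.drop_drop]
    congr 2
    omega

-- B's loop with a partially filled buffer produces the chunks of current ++ l
theorem pvAltFlush_eq (sep : String) (n : Int) (hn : 1 ≤ n) :
    ∀ (l current lines : List String), (current.length : Int) < n →
    pvAltFlush sep n lines current l
      = lines ++ (pvChunks n.toNat (current ++ l)).map (PySem.Str.join sep) := by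
  intro l
  induction l with
  | nil =>
    intro current lines hc
    by_cases h : current = []
    · simp [pvAltFlush, h, pvChunks_nil]
    · simp only [pvAltFlush, if_neg h, List.append_nil]
      rw [pvChunks_step n.toNat (by omega) current h]
      rw [List.take_of_length_le (by omega), List.drop_eq_nil_of_le (by omega)]
      rw [pvChunks_nil]
      simp
  | cons v rest IH =>
    intro current lines hc
    simp only [pvAltFlush]
    by_cases hf : (((current ++ [v]).length : Nat) : Int) = n
    · rw [if_pos hf]
      have hlen : n.toNat = (current ++ [v]).length := by
        simp only [List.length_append, List.length_cons] at hf ⊢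
        omega
      have hr : pvChunks n.toNat ((current ++ [v]) ++ rest)
          = (current ++ [v]) :: pvChunks n.toNat rest := by
        rw [pvChunks_step n.toNat (by omega) _ (by simp), hlen, List.take_left, List.drop_left]
      rw [IH [] (lines ++ [PySem.Str.join sep (current ++ [v])]) (by simp; omega)]
      have hsplit : current ++ v :: rest = (current ++ [v]) ++ rest := by simp
      rw [hsplit, hr]
      simp
    · rw [if_neg hf]
      have hc' : (((current ++ [v]).length : Nat) : Int) < n := by
        simp at hf hc ⊢
        omega
      rw [IH (current ++ [v]) lines hc']
      congr 2
      simp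

theorem pvLists_eq (vals : List String) (n : Int) (sep : String) (hn : 1 ≤ n) :
    (PySem.List.pyRange 0 (vals.length : Int) n).map (fun s =>
      PySem.Str.join sep
        ((PySem.List.pyRange s (min (vals.length : Int) (s + n)) 1).map
          (fun i => PySem.List.pyGetD vals i "")))
    = pvAltFlush sep n [] [] vals := by
  have hmem : ∀ s ∈ PySem.List.pyRange 0 (vals.length : Int) n, (0:Int) ≤ s := by
    intro s hs
    exact ((PySem.List.mem_pyRange_iff_of_pos (by omega) s).1 hs).1
  calc (PySem.List.pyRange 0 (vals.length : Int) n).map (fun s =>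
      PySem.Str.join sep
        ((PySem.List.pyRange s (min (vals.length : Int) (s + n)) 1).map
          (fun i => PySem.List.pyGetD vals i "")))
      = (PySem.List.pyRange 0 (vals.length : Int) n).map (fun s =>
          PySem.Str.join sep ((vals.drop s.toNat).take n.toNat)) := by
        apply List.map_congr_left
        intro s hs
        rw [pvInner_eq vals n s (hmem s hs) (by omega)]
    _ = ((PySem.List.pyRange 0 (vals.length : Int) n).map
          (fun s => (vals.drop s.toNat).take n.toNat)).map (PySem.Str.join sep) := by
        rw [List.map_map]; rfl
    _ = (pvChunks n.toNat vals).map (PySem.Str.join sep) := by rw [pvOuter_eq n hn vals]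
    _ = pvAltFlush sep n [] [] vals := by
        rw [pvAltFlush_eq sep n hn vals [] [] (by simp; omega)]; simp

-- ===== VERDICT (by name: the statement is the Claim_ definition above) =====
theorem group_n_per_line_spec : Claim_equal_group_n_per_line := by
  intro vals n sep gsep sgs _hdom hpre
  unfold Spec_group_n_per_line group_n_per_line group_n_per_line_alt
  rw [pvLists_eq vals n sep hpre]
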